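-- pv_equiv track=rewrite | github.com/TMAstrider/UCB-CS61A | lab/lab06/lab06.py | insert_items
-- ===== SOURCE A (Python) =====
-- def insert_items(lst, entry, elem):
--     """
--     >>> test_lst = [1, 5, 8, 5, 2, 3]
--     >>> new_lst = insert_items(test_lst, 5, 7)
--     >>> new_lst
--     [1, 5, 7, 8, 5, 7, 2, 3]
--     >>> large_lst = [1, 4, 8]
--     >>> large_lst2 = insert_items(large_lst, 4, 4)
--     >>> large_lst2
--     [1, 4, 4, 8]
--     >>> large_lst3 = insert_items(large_lst2, 4, 6)
--     >>> large_lst3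
--     [1, 4, 6, 4, 6, 8]
--     >>> large_lst3 is large_lst
--     True
--     """
--     "*** YOUR CODE HERE ***"
--     i = 0
--     state = 0
--     for o in lst:
--         if o == entry and state == 0:
--             lst.insert(i + 1, elem)
--             state = 1
--             i += 1
--             continue
--         state = 0
--         i += 1
--     return lst
-- ===== SOURCE B (Python) =====
-- def insert_items(lst, entry, elem):
--     positions = [i for i, x in enumerate(lst) if x == entry]
--     for p in reversed(positions):
--         lst.insert(p + 1, elem)
--     return lst
-- ===== Notes on version B (the rewrite author's own statement) =====
-- stated objective: simpler
-- what changed: Replaces A's single mutating scan with an index cursor and a state flag by a stateless two-phase pass: collect the original positions of entry once, then insert elem after each from right to left so earlier positions stay valid.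
import Mathlib
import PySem

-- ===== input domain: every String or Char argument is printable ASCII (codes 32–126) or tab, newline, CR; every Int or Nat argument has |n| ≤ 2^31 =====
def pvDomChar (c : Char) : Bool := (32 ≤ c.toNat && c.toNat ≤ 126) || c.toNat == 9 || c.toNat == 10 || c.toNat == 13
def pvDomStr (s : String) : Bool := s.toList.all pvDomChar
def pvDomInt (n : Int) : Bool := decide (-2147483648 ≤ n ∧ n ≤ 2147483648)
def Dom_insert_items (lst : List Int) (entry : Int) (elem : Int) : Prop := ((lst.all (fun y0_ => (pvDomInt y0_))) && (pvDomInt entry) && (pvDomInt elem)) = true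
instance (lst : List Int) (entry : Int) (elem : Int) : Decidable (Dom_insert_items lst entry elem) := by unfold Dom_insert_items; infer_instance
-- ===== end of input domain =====

-- B replaces A's single mutating scan with a stateless two-phase pass (collect original positions of entry, then insert right-to-left); equal return value proved; both Pythons mutate lst in place identically. Objective: simpler.

-- ===== PORT A =====
-- A iterates over lst while inserting into it; the Python 'for o in lst' over the
-- mutating list is an index loop (the internal cursor equals A's own i at all times).
def insertItemsLoopA (entry : Int) (elem : Int) (lst : List Int) (i : Nat) (state : Nat) : List Int :=
  if h : i < lst.length then
    if hc : lst[i] = entry ∧ state = 0 then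
      insertItemsLoopA entry elem (PySem.List.insert lst ((i : Int) + 1) elem) (i + 1) 1
    else
      insertItemsLoopA entry elem lst (i + 1) 0
  else lst
termination_by (lst.length - i) * 2 + (if state = 0 then 1 else 0)
decreasing_by
  · have hl := PySem.List.length_insert lst ((i : Int) + 1) elem
    rw [hl, hc.2]; simp
  · split_ifs <;> omega

def insert_items (lst : List Int) (entry : Int) (elem : Int) : List Int :=
  insertItemsLoopA entry elem lst 0 0

-- ===== PORT B =====
def insert_items_alt (lst : List Int) (entry : Int) (elem : Int) : List Int :=
  let positions := ((PySem.List.enumerate lst 0).filter (fun p => decide (p.2 = entry))).map (fun p => p.1)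
  positions.reverse.foldl (fun acc p => PySem.List.insert acc (p + 1) elem) lst

-- ===== PRECONDITION & SPEC =====
def Spec_insert_items (lst : List Int) (entry : Int) (elem : Int) (out : List Int) : Prop := out = insert_items_alt lst entry elem
instance (lst : List Int) (entry : Int) (elem : Int) (out : List Int) : Decidable (Spec_insert_items lst entry elem out) := by unfold Spec_insert_items; infer_instance

-- ===== CLAIM (what is proved, stated in full; the proofs are below) =====
def Claim_equal_insert_items : Prop := ∀ (lst : List Int) (entry : Int) (elem : Int), Dom_insert_items lst entry elem → Spec_insert_items lst entry elem (insert_items lst entry elem)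

-- ===== LEMMAS AND PROOFS =====

-- Inserting at position done.length + 1 into done ++ x :: rest puts v right after x.
lemma insert_mid (done rest : List Int) (x v : Int) :
    PySem.List.insert (done ++ x :: rest) ((done.length : Int) + 1) v = done ++ x :: v :: rest := by
  have h : done ++ x :: rest = (done ++ [x]) ++ rest := by simp
  rw [h]
  have hle : (done ++ [x]).length ≤ ((done ++ [x]) ++ rest).length := by simp
  have := PySem.List.insert_natCast ((done ++ [x]) ++ rest) (done ++ [x]).length v hle
  simp only [List.take_left, List.drop_left] at this
  have hcast : ((done.length : Int) + 1) = (((done ++ [x]).length : Nat) : Int) := by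
    simp [List.length_append]
  rw [hcast, this]; simp

def pvF (entry elem : Int) (x : Int) : List Int := if x = entry then [x, elem] else [x]

lemma loopA_eq (entry elem : Int) :
    ∀ (rest done : List Int),
      insertItemsLoopA entry elem (done ++ rest) done.length 0 = done ++ rest.flatMap (pvF entry elem) := by
  intro rest
  induction rest with
  | nil =>
      intro done
      rw [insertItemsLoopA]
      simp
  | cons x rest ih =>
      intro done
      rw [insertItemsLoopA]
      have hlt : done.length < (done ++ x :: rest).length := by simp
      have hx : (done ++ x :: rest)[done.length]'hlt = x := by
        rw [List.getElem_append_right (le_refl _)]; simp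
      rw [dif_pos hlt]
      by_cases hxe : x = entry
      · rw [dif_pos (show (done ++ x :: rest)[done.length]'hlt = entry ∧ (0:Nat) = 0 from ⟨by rw [hx, hxe], rfl⟩)]
        rw [insert_mid]
        -- one more step, state = 1
        rw [insertItemsLoopA]
        have hlt2 : done.length + 1 < (done ++ x :: elem :: rest).length := by simp
        rw [dif_pos hlt2]
        rw [dif_neg (by simp)]
        have h2 : done ++ x :: elem :: rest = (done ++ [x, elem]) ++ rest := by simp
        have hlen2 : done.length + 1 + 1 = (done ++ [x, elem]).length := by simp
        rw [h2, hlen2, ih (done ++ [x, elem])]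
        simp [pvF, hxe]
      · rw [dif_neg (by rw [hx]; tauto)]
        have h2 : done ++ x :: rest = (done ++ [x]) ++ rest := by simp
        have hlen2 : done.length + 1 = (done ++ [x]).length := by simp
        rw [h2, hlen2, ih (done ++ [x])]
        simp [pvF, hxe]

lemma foldlB_eq (entry elem : Int) :
    ∀ (rest done : List Int),
      (((PySem.List.enumerate rest ((done.length : Nat) : Int)).filter (fun p => decide (p.2 = entry))).map
          (fun p => p.1)).reverse.foldl (fun acc p => PySem.List.insert acc (p + 1) elem) (done ++ rest)
        = done ++ rest.flatMap (pvF entry elem) := by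
  intro rest
  induction rest with
  | nil =>
      intro done
      simp [PySem.List.enumerate]
  | cons x rest ih =>
      intro done
      rw [PySem.List.enumerate_cons]
      have hstep : ((done.length : Int) + 1) = (((done ++ [x]).length : Nat) : Int) := by
        simp
      by_cases hxe : x = entry
      · rw [List.filter_cons_of_pos (by simp [hxe])]
        simp only [List.map_cons, List.reverse_cons, List.foldl_append, List.foldl_cons, List.foldl_nil]
        have h2 : done ++ x :: rest = (done ++ [x]) ++ rest := by simp
        rw [h2, hstep, ih (done ++ [x])]
        have h3 : (done ++ [x]) ++ rest.flatMap (pvF entry elem) = done ++ x :: rest.flatMap (pvF entry elem) := by simp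
        rw [h3, ← hstep, insert_mid]
        simp [pvF, hxe]
      · rw [List.filter_cons_of_neg (by simp [hxe])]
        have h2 : done ++ x :: rest = (done ++ [x]) ++ rest := by simp
        rw [h2, hstep, ih (done ++ [x])]
        simp [pvF, hxe]

-- ===== VERDICT (by name: the statement is the Claim_ definition above) =====
theorem insert_items_spec : Claim_equal_insert_items := by
  intro lst entry elem _
  unfold Spec_insert_items insert_items insert_items_alt
  have hA := loopA_eq entry elem lst []
  have hB := foldlB_eq entry elem lst []
  simp only [List.nil_append, List.length_nil, Nat.cast_zero] at hA hB
  rw [hA, hB]
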